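-- pv_equiv track=rewrite | github.com/pypi-data/pypi-mirror-65 | packages/bigml-chronos/bigml-chronos-0.4.3.tar.gz/bigml-chronos-0.4.3/bigml_chronos/chronos.py | _joda_to_python
-- ===== SOURCE A (Python) =====
-- joda_to_python = {
--     "Y": "%Y",
--     "w": "%U",
--     "e": "%w",
--     "E": "%A",
--     "y": "%y",
--     "D": "%j",
--     "M": "%m",
--     "d": "%d",
--     "a": "%p",
--     "h": "%I",
--     "H": "%H",
--     "m": "%M",
--     "s": "%S",
--     "z": "%Z",
--     "EEEE": "%A",
--     "EE": "%a",
--     "MMMM": "%B",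
--     "MMM": "%b",
--     "YYYY": "%Y",
--     "YY": "%y"}
--
-- def _joda_to_python(fmt):
--     """Translate a joda custom format to Python standards
--
--     """
--     keys = joda_to_python.keys()
--     datetime_components = []
--     last_char = ""
--     word = ""
--     for char in fmt:
--         if char in keys:
--             if last_char != char:
--                 if word != "":
--                     datetime_components.append(word)
--                     word = ""
--             word +=char
--         else:
--             if word != "":
--                 datetime_components.append(word)
--             datetime_components.append(char)
--             word = ""
--
--         last_char = char
--     if word != "":
--         datetime_components.append(word)
--
--     for index in range(len(datetime_components)):
--         word = datetime_components[index]
--         if word in joda_to_python: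
--             datetime_components[index] = joda_to_python[word]
--         elif word[0] in joda_to_python:
--             datetime_components[index] = joda_to_python[word[0]]
--     return "".join(datetime_components)
-- ===== SOURCE B (Python) =====
-- def _translate(c, n):
--     """Translate a run of n copies of character c."""
--     if c == 'E':
--         return '%a' if n == 2 else '%A'
--     if c == 'M':
--         if n == 3:
--             return '%b'
--         if n == 4:
--             return '%B'
--         return '%m'
--     if c == 'Y':
--         return '%y' if n == 2 else '%Y'
--     if c == 'w':
--         return '%U'
--     if c == 'e':
--         return '%w'
--     if c == 'y':
--         return '%y'
--     if c == 'D':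
--         return '%j'
--     if c == 'd':
--         return '%d'
--     if c == 'a':
--         return '%p'
--     if c == 'h':
--         return '%I'
--     if c == 'H':
--         return '%H'
--     if c == 'm':
--         return '%M'
--     if c == 's':
--         return '%S'
--     if c == 'z':
--         return '%Z'
--     return c * n
--
-- def _joda_to_python(fmt):
--     """Translate a joda custom format to Python standards"""
--     out = []
--     i = 0
--     n = len(fmt)
--     while i < n:
--         c = fmt[i]
--         j = i + 1
--         while j < n and fmt[j] == c:
--             j += 1
--         out.append(_translate(c, j - i))
--         i = j
--     return "".join(out)
-- ===== Notes on version B (the rewrite author's own statement) =====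
-- stated objective: alternative
-- what changed: A tokenizes char-by-char with last_char/word state into a component list, keeps the 20-entry Joda dict, and rewrites the list in a second indexed pass; B drops the dict entirely: one two-index scan over maximal runs of identical characters, each run translated immediately by a per-character function on (char, run length) that encodes the dict's run/first-char fallback as explicit length rules.
import Mathlib
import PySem

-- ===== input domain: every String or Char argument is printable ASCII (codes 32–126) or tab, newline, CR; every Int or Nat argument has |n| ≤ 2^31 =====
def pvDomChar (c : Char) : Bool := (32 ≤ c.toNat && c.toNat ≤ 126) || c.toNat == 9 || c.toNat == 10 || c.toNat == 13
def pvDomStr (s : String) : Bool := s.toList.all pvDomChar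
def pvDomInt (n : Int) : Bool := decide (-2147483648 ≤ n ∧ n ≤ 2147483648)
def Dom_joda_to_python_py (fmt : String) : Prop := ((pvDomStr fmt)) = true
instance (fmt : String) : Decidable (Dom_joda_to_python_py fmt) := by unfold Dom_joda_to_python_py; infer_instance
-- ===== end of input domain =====

-- B replaces A's two-phase translation (char-by-char tokenizer with last_char/word state,
-- then an indexed rewrite pass over the dict-driven component list) by a single two-index
-- run scan with a per-character length-rule translator and no dictionary; same O(n) cost.


-- ===== PORT A =====
-- The module-level dict joda_to_python (strings as List Char, per the PySem convention)
def jodaDict : PySem.Dict (List Char) (List Char) :=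
  ⟨[(['Y'], ['%','Y']), (['w'], ['%','U']), (['e'], ['%','w']), (['E'], ['%','A']),
     (['y'], ['%','y']), (['D'], ['%','j']), (['M'], ['%','m']), (['d'], ['%','d']),
     (['a'], ['%','p']), (['h'], ['%','I']), (['H'], ['%','H']), (['m'], ['%','M']),
     (['s'], ['%','S']), (['z'], ['%','Z']),
     (['E','E','E','E'], ['%','A']), (['E','E'], ['%','a']),
     (['M','M','M','M'], ['%','B']), (['M','M','M'], ['%','b']),
     (['Y','Y','Y','Y'], ['%','Y']), (['Y','Y'], ['%','y'])]⟩

-- one step of A's first loop; state = (datetime_components, last_char, word)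
def stepA (st : List (List Char) × List Char × List Char) (ch : Char) :
    List (List Char) × List Char × List Char :=
  let (comps, last, word) := st
  if jodaDict.keys.contains [ch] then          -- char in keys
    if last ≠ [ch] ∧ word ≠ [] then
      (comps ++ [word], [ch], [ch])            -- append word, reset, then word += char
    else
      (comps, [ch], word ++ [ch])              -- word += char
  else
    if word ≠ [] then
      (comps ++ [word, [ch]], [ch], [])        -- append word, append char
    else
      (comps ++ [[ch]], [ch], [])              -- append char

-- body of A's second loop (rewrite one component in place)
def transformA (w : List Char) : List Char :=
  match jodaDict.get? w with                   -- if word in joda_to_python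
  | some v => v
  | none =>
    match w with                               -- elif word[0] in joda_to_python
    | c :: _ =>
      match jodaDict.get? [c] with
      | some v => v
      | none => w
    | [] => w                                  -- unreachable: components are never empty

def joda_to_python_py (fmt : String) : String :=
  let st := fmt.toList.foldl stepA ([], [], [])
  let comps := if st.2.2 ≠ [] then st.1 ++ [st.2.2] else st.1   -- trailing 'if word != ""'
  String.ofList (PySem.Chars.join [] (comps.map transformA))    -- "".join after the rewrite loop

-- ===== PORT B =====
-- Source B's _translate(c, n): the if/elif chain on the run's character and length
def translateB (c : Char) (n : Nat) : List Char :=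
  if c = 'E' then (if n = 2 then ['%','a'] else ['%','A'])
  else if c = 'M' then
    (if n = 3 then ['%','b'] else if n = 4 then ['%','B'] else ['%','m'])
  else if c = 'Y' then (if n = 2 then ['%','y'] else ['%','Y'])
  else if c = 'w' then ['%','U']
  else if c = 'e' then ['%','w']
  else if c = 'y' then ['%','y']
  else if c = 'D' then ['%','j']
  else if c = 'd' then ['%','d']
  else if c = 'a' then ['%','p']
  else if c = 'h' then ['%','I']
  else if c = 'H' then ['%','H']
  else if c = 'm' then ['%','M']
  else if c = 's' then ['%','S']
  else if c = 'z' then ['%','Z']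
  else List.replicate n c                       -- c * n

-- Source B's outer while loop: find the end j of the run of fmt[i] (inner while),
-- translate (fmt[i], j - i), continue at j
def bLoop : List Char → List (List Char)
  | [] => []
  | c :: rest =>
    translateB c ((rest.takeWhile (· == c)).length + 1) :: bLoop (rest.dropWhile (· == c))
termination_by l => l.length
decreasing_by
  exact Nat.lt_succ_of_le (List.length_dropWhile_le _ _)

def joda_to_python_py_alt (fmt : String) : String :=
  String.ofList (PySem.Chars.join [] (bLoop fmt.toList))

-- ===== PRECONDITION & SPEC =====
def Spec_joda_to_python_py (fmt : String) (out : String) : Prop := out = joda_to_python_py_alt fmt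
instance (fmt : String) (out : String) : Decidable (Spec_joda_to_python_py fmt out) := by unfold Spec_joda_to_python_py; infer_instance

-- ===== CLAIM (what is proved, stated in full; the proofs are below) =====
def Claim_equal_joda_to_python_py : Prop := ∀ (fmt : String), Dom_joda_to_python_py fmt → Spec_joda_to_python_py fmt (joda_to_python_py fmt)

-- ===== LEMMAS AND PROOFS =====

theorem join_nil_cons (a : List Char) (l : List (List Char)) :
    PySem.Chars.join [] (a :: l) = a ++ PySem.Chars.join [] l := by
  simp [PySem.Chars.join, List.intercalate]
  cases l with
  | nil => simp
  | cons b t => simp [List.intersperse]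

-- the single-character keys of jodaDict
def isKeyC (c : Char) : Bool := ['Y','w','e','E','y','D','M','d','a','h','H','m','s','z'].contains c

theorem keys_contains_single (c : Char) : jodaDict.keys.contains [c] = isKeyC c := by
  rw [Bool.eq_iff_iff]
  unfold isKeyC
  simp only [jodaDict, PySem.Dict.keys_mk, List.map, List.contains_iff_mem,
    List.mem_cons, List.not_mem_nil, List.cons.injEq, and_true, or_false]
  tauto

theorem mem_keys_of_isKeyC {c : Char} (hc : isKeyC c = true) : [c] ∈ jodaDict.keys := by
  rw [← List.contains_iff_mem, keys_contains_single]; exact hc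

theorem not_mem_keys_of_not_isKeyC {c : Char} (hc : isKeyC c = false) : [c] ∉ jodaDict.keys := by
  rw [← List.contains_iff_mem, keys_contains_single, hc]; simp

theorem get?_nonkey (c : Char) (t : List Char) (h : isKeyC c = false) :
    jodaDict.get? (c :: t) = none := by
  have h' : c ∉ ['Y','w','e','E','y','D','M','d','a','h','H','m','s','z'] := by
    simpa [isKeyC] using h
  simp only [List.mem_cons, List.not_mem_nil, or_false, not_or] at h'
  obtain ⟨h1,h2,h3,h4,h5,h6,h7,h8,h9,h10,h11,h12,h13,h14⟩ := h'
  simp [jodaDict, PySem.Dict.get?, Ne.symm h1, Ne.symm h2, Ne.symm h3, Ne.symm h4,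
    Ne.symm h5, Ne.symm h6, Ne.symm h7, Ne.symm h8, Ne.symm h9, Ne.symm h10,
    Ne.symm h11, Ne.symm h12, Ne.symm h13, Ne.symm h14]

-- every key of jodaDict has length ≤ 4
theorem get?_long (w : List Char) (h : 5 ≤ w.length) : jodaDict.get? w = none := by
  have ne : ∀ (k : List Char), k.length ≤ 4 → ¬ k = w := by
    intro k hk e; subst e; omega
  simp [jodaDict, PySem.Dict.get?,
    ne ['Y'] (by decide), ne ['w'] (by decide), ne ['e'] (by decide), ne ['E'] (by decide),
    ne ['y'] (by decide), ne ['D'] (by decide), ne ['M'] (by decide), ne ['d'] (by decide),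
    ne ['a'] (by decide), ne ['h'] (by decide), ne ['H'] (by decide), ne ['m'] (by decide),
    ne ['s'] (by decide), ne ['z'] (by decide),
    ne ['E','E','E','E'] (by decide), ne ['E','E'] (by decide),
    ne ['M','M','M','M'] (by decide), ne ['M','M','M'] (by decide),
    ne ['Y','Y','Y','Y'] (by decide), ne ['Y','Y'] (by decide)]

-- on a run of length ≥ 5 the first lookup misses and A falls back to the first character
theorem transformA_long (c : Char) (m : Nat) :
    transformA (List.replicate (m + 5) c) = (jodaDict.get? [c]).getD (List.replicate (m + 5) c) := by
  have hg : jodaDict.get? (List.replicate (m + 5) c) = none :=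
    get?_long _ (by simp)
  unfold transformA
  rw [hg]
  rw [show List.replicate (m + 5) c = c :: List.replicate (m + 4) c from List.replicate_succ ..]
  cases h : jodaDict.get? [c] <;> simp [h]

-- A's rewrite of a run of a key character agrees with B's length-rule translator
theorem transformA_rep (c : Char) (hc : isKeyC c = true) (n : Nat) :
    transformA (List.replicate (n + 1) c) = translateB c (n + 1) := by
  have hc' : c = 'Y' ∨ c = 'w' ∨ c = 'e' ∨ c = 'E' ∨ c = 'y' ∨ c = 'D' ∨ c = 'M' ∨ c = 'd' ∨
      c = 'a' ∨ c = 'h' ∨ c = 'H' ∨ c = 'm' ∨ c = 's' ∨ c = 'z' := by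
    simpa [isKeyC] using hc
  rcases hc' with h|h|h|h|h|h|h|h|h|h|h|h|h|h <;> subst h <;>
    (rcases n with _|_|_|_|m
     · decide
     · decide
     · decide
     · decide
     · rw [show m + 3 + 1 + 1 = m + 5 from by omega, transformA_long]
       simp [jodaDict, PySem.Dict.get?, translateB, show ¬(m + 5 = 2) from by omega,
         show ¬(m + 5 = 3) from by omega, show ¬(m + 5 = 4) from by omega])

-- B's translator on a non-key character is the unchanged run
theorem translateB_nonkey (c : Char) (hc : isKeyC c = false) (n : Nat) :
    translateB c n = List.replicate n c := by
  have h' : c ∉ ['Y','w','e','E','y','D','M','d','a','h','H','m','s','z'] := by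
    simpa [isKeyC] using hc
  simp only [List.mem_cons, List.not_mem_nil, or_false, not_or] at h'
  obtain ⟨h1,h2,h3,h4,h5,h6,h7,h8,h9,h10,h11,h12,h13,h14⟩ := h'
  simp [translateB, h1, h2, h3, h4, h5, h6, h7, h8, h9, h10, h11, h12, h13, h14]

-- a takeWhile (· == c) prefix is a replicate of c
theorem takeWhile_eq_rep (c : Char) (l : List Char) :
    l.takeWhile (· == c) = List.replicate (l.takeWhile (· == c)).length c := by
  rw [List.eq_replicate_iff]
  refine ⟨rfl, fun b hb => ?_⟩
  simpa using List.mem_takeWhile_imp hb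

-- the component list A's first loop (plus trailing flush) produces from state (last, word)
def tokA : List Char → List Char → List Char → List (List Char)
  | [], _, word => if word ≠ [] then [word] else []
  | ch :: rest, last, word =>
    if jodaDict.keys.contains [ch] then
      if last ≠ [ch] ∧ word ≠ [] then word :: tokA rest [ch] [ch]
      else tokA rest [ch] (word ++ [ch])
    else
      if word ≠ [] then word :: [ch] :: tokA rest [ch] []
      else [ch] :: tokA rest [ch] []

theorem foldA_eq (l : List Char) : ∀ (comps : List (List Char)) (last word : List Char),
    (if (l.foldl stepA (comps, last, word)).2.2 ≠ [] then
        (l.foldl stepA (comps, last, word)).1 ++ [(l.foldl stepA (comps, last, word)).2.2]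
      else (l.foldl stepA (comps, last, word)).1)
      = comps ++ tokA l last word := by
  induction l with
  | nil =>
    intro comps last word
    simp only [List.foldl_nil, tokA]
    split_ifs <;> simp
  | cons ch rest ih =>
    intro comps last word
    rw [List.foldl_cons]
    by_cases hk : jodaDict.keys.contains [ch] = true
    · by_cases hlw : last ≠ [ch] ∧ word ≠ []
      · rw [show stepA (comps, last, word) ch = (comps ++ [word], [ch], [ch]) by
              unfold stepA; dsimp only; rw [if_pos hk, if_pos hlw]]
        rw [ih, show tokA (ch :: rest) last word = word :: tokA rest [ch] [ch] by
              conv_lhs => rw [tokA]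
              all_goals rw [if_pos hk, if_pos hlw]]
        simp
      · rw [show stepA (comps, last, word) ch = (comps, [ch], word ++ [ch]) by
              unfold stepA; dsimp only; rw [if_pos hk, if_neg hlw]]
        rw [ih, show tokA (ch :: rest) last word = tokA rest [ch] (word ++ [ch]) by
              conv_lhs => rw [tokA]
              all_goals rw [if_pos hk, if_neg hlw]]
    · by_cases hw : word ≠ []
      · rw [show stepA (comps, last, word) ch = (comps ++ [word, [ch]], [ch], []) by
              unfold stepA; dsimp only; rw [if_neg hk, if_pos hw]]
        rw [ih, show tokA (ch :: rest) last word = word :: [ch] :: tokA rest [ch] [] by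
              conv_lhs => rw [tokA]
              all_goals rw [if_neg hk, if_pos hw]]
        simp
      · rw [show stepA (comps, last, word) ch = (comps ++ [[ch]], [ch], []) by
              unfold stepA; dsimp only; rw [if_neg hk, if_neg hw]]
        rw [ih, show tokA (ch :: rest) last word = [ch] :: tokA rest [ch] [] by
              conv_lhs => rw [tokA]
              all_goals rw [if_neg hk, if_neg hw]]
        simp

-- accumulation over a run of one key character
theorem tokA_key_run (c : Char) (hc : isKeyC c = true) : ∀ (rest w : List Char), w ≠ [] →
    tokA rest [c] w
      = (w ++ rest.takeWhile (· == c)) :: tokA (rest.dropWhile (· == c)) [c] [] := by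
  intro rest
  induction rest with
  | nil => intro w hw; simp [tokA, hw]
  | cons d t ih =>
    intro w hw
    by_cases hd : d = c
    · subst hd
      rw [show tokA (d :: t) [d] w = tokA t [d] (w ++ [d]) by
            simp [tokA, mem_keys_of_isKeyC hc]]
      rw [ih (w ++ [d]) (by simp)]
      simp
    · have htw : (d :: t).takeWhile (· == c) = [] := by simp [hd]
      have hdw : (d :: t).dropWhile (· == c) = d :: t := by simp [hd]
      rw [htw, hdw]
      by_cases hkd : isKeyC d = true
      · have hne : ([c] : List Char) ≠ [d] := by simp [Ne.symm hd]
        rw [show tokA (d :: t) [c] w = w :: tokA t [d] [d] by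
              simp [tokA, mem_keys_of_isKeyC hkd, hne, hw]]
        rw [show tokA (d :: t) [c] [] = tokA t [d] [d] by
              simp [tokA, mem_keys_of_isKeyC hkd]]
        simp
      · have hkd' : isKeyC d = false := by simpa using hkd
        rw [show tokA (d :: t) [c] w = w :: [d] :: tokA t [d] [] by
              simp [tokA, not_mem_keys_of_not_isKeyC hkd', hw]]
        rw [show tokA (d :: t) [c] [] = [d] :: tokA t [d] [] by
              simp [tokA, not_mem_keys_of_not_isKeyC hkd']]
        simp

theorem join_nil_append (l1 l2 : List (List Char)) :
    PySem.Chars.join [] (l1 ++ l2) = PySem.Chars.join [] l1 ++ PySem.Chars.join [] l2 := by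
  induction l1 with
  | nil => simp [PySem.Chars.join, List.intercalate]
  | cons a t ih => simp [join_nil_cons, ih]

theorem dropWhile_head_false {p : Char → Bool} {l : List Char} {c : Char} {t : List Char}
    (h : l.dropWhile p = c :: t) : p c = false := by
  have h2 : l.dropWhile p ≠ [] := by simp [h]
  have := List.head_dropWhile_not (l := l) (p := p) h2
  simpa [h] using this

-- A tokenizer run of one NON-key character comes out as single characters
theorem tokA_nonkey_run (c : Char) (hc : isKeyC c = false) : ∀ (rest last : List Char),
    tokA (c :: rest) last []
      = ((c :: rest.takeWhile (· == c)).map (fun x => [x]))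
        ++ tokA (rest.dropWhile (· == c)) [c] [] := by
  intro rest
  induction rest with
  | nil =>
    intro last
    simp [tokA, not_mem_keys_of_not_isKeyC hc]
  | cons d t ih =>
    intro last
    rw [show tokA (c :: d :: t) last [] = [c] :: tokA (d :: t) [c] [] by
          simp [tokA, not_mem_keys_of_not_isKeyC hc]]
    by_cases hd : d = c
    · subst hd
      rw [ih [d]]
      simp
    · have htw : (d :: t).takeWhile (· == c) = [] := by simp [hd]
      have hdw : (d :: t).dropWhile (· == c) = d :: t := by simp [hd]
      rw [htw, hdw]
      simp

theorem transformA_nonkey_single (c : Char) (hc : isKeyC c = false) : transformA [c] = [c] := by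
  unfold transformA
  simp [get?_nonkey c [] hc]

theorem main_lemma : ∀ (l : List Char) (last : List Char),
    (∀ c t, l = c :: t → last ≠ [c]) →
    PySem.Chars.join [] ((tokA l last []).map transformA) = PySem.Chars.join [] (bLoop l) := by
  intro l
  induction l using bLoop.induct with
  | case1 => intro last _; simp [tokA, bLoop]
  | case2 c rest ih =>
    intro last hlast
    have hrec : ∀ c' t, rest.dropWhile (· == c) = c' :: t → ([c] : List Char) ≠ [c'] := by
      intro c' t h hcc
      have hpc := dropWhile_head_false h
      simp at hcc
      simp [hcc] at hpc
    rw [show bLoop (c :: rest)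
          = translateB c ((rest.takeWhile (· == c)).length + 1)
              :: bLoop (rest.dropWhile (· == c)) from by rw [bLoop]]
    rw [join_nil_cons]
    have hrun : c :: rest.takeWhile (· == c)
        = List.replicate ((rest.takeWhile (· == c)).length + 1) c := by
      conv_lhs => rw [takeWhile_eq_rep c rest]
      rw [List.replicate_succ]
    by_cases hk : isKeyC c = true
    · have hne : last ≠ [c] := hlast c rest rfl
      have h1 : tokA (c :: rest) last [] = tokA rest [c] [c] := by
        simp [tokA, mem_keys_of_isKeyC hk]
      rw [h1, tokA_key_run c hk rest [c] (by simp)]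
      simp only [List.map_cons]
      rw [join_nil_cons, ih [c] hrec]
      congr 1
      rw [show ([c] ++ rest.takeWhile (· == c)) = c :: rest.takeWhile (· == c) from rfl, hrun]
      exact transformA_rep c hk _
    · have hk' : isKeyC c = false := by simpa using hk
      rw [tokA_nonkey_run c hk' rest last, List.map_append, join_nil_append, ih [c] hrec]
      congr 1
      have hsing : ((c :: rest.takeWhile (· == c)).map (fun x => [x])).map transformA
          = (c :: rest.takeWhile (· == c)).map (fun x => [x]) := by
        rw [List.map_map]
        apply List.map_congr_left
        intro x hx
        have hxc : x = c := by
          rcases List.mem_cons.mp hx with h | h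
          · exact h
          · simpa using List.mem_takeWhile_imp h
        subst hxc
        simp [Function.comp, transformA_nonkey_single x hk']
      rw [hsing, PySem.Chars.join_nil_singletons, translateB_nonkey c hk', hrun]

-- ===== VERDICT (by name: the statement is the Claim_ definition above) =====
theorem joda_to_python_py_spec : Claim_equal_joda_to_python_py := by
  intro fmt _
  unfold Spec_joda_to_python_py
  simp only [joda_to_python_py, joda_to_python_py_alt]
  have h := foldA_eq fmt.toList [] [] []
  simp only at h
  rw [h]
  simp only [List.nil_append]
  rw [main_lemma fmt.toList [] (by intro c t _ h; cases h)]
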